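-- pv_equiv track=rewrite | github.com/hamzajaved05/text2map | training.py | seq_klass
-- ===== SOURCE A (Python) =====
-- def seq_klass(klass):
--     x = -1
--     arr = []
--     klass2 = []
--     for i in klass:
--         if i not in arr:
--             x+=1
--             arr.append(i)
--         klass2.append(x)
--     return klass2
-- ===== SOURCE B (Python) =====
-- def seq_klass(klass):
--     return [len(set(klass[:j + 1])) - 1 for j in range(len(klass))]
-- ===== Notes on version B (the rewrite author's own statement) =====
-- stated objective: simpler
-- what changed: A's single interleaved pass carrying a seen-list and a running counter is replaced by a one-line closed form: the value at position j is the number of distinct elements of the prefix klass[:j+1] minus one, computed per position with set().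
import Mathlib
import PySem

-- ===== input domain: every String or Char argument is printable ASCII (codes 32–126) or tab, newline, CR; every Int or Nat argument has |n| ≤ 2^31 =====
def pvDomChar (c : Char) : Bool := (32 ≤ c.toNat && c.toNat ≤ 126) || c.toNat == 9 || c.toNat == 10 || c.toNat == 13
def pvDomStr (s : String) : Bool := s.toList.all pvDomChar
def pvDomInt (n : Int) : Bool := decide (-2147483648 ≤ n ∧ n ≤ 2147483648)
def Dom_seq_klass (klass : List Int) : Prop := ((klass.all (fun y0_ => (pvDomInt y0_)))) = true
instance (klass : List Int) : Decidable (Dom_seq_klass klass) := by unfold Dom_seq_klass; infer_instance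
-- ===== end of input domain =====

-- B replaces A's interleaved pass (running counter + seen-list) by a per-position
-- closed form: out[j] = len(set(klass[:j+1])) - 1; objective: simpler (one line).

-- ===== PORT A =====
-- literal transliteration: state (x, arr, klass2), one pass, `i not in arr` is list membership
def seq_klass (klass : List Int) : List Int :=
  (klass.foldl (fun (s : Int × List Int × List Int) i =>
      if i ∈ s.2.1 then (s.1, s.2.1, s.2.2 ++ [s.1])
      else (s.1 + 1, s.2.1 ++ [i], s.2.2 ++ [s.1 + 1]))
    (-1, [], [])).2.2

-- ===== PORT B =====
-- [len(set(klass[:j+1])) - 1 for j in range(len(klass))]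
def seq_klass_alt (klass : List Int) : List Int :=
  (PySem.List.pyRange 0 (klass.length : Int) 1).map (fun j =>
    ((PySem.Set.ofList (PySem.List.slice klass none (some (j + 1)))).length : Int) - 1)

-- ===== PRECONDITION & SPEC =====
def Spec_seq_klass (klass : List Int) (out : List Int) : Prop := out = seq_klass_alt klass
instance (klass : List Int) (out : List Int) : Decidable (Spec_seq_klass klass out) := by unfold Spec_seq_klass; infer_instance

-- ===== CLAIM (what is proved, stated in full; the proofs are below) =====
def Claim_equal_seq_klass : Prop := ∀ (klass : List Int), Dom_seq_klass klass → Spec_seq_klass klass (seq_klass klass)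

-- ===== LEMMAS AND PROOFS =====

-- A's tail, as structural recursion
def pvARec (l : List Int) (x : Int) (arr : List Int) : List Int :=
  match l with
  | [] => []
  | i :: l => if i ∈ arr then x :: pvARec l x arr else (x + 1) :: pvARec l (x + 1) (arr ++ [i])

theorem pvFoldA (l : List Int) (x : Int) (arr k2 : List Int) :
    ((l.foldl (fun (s : Int × List Int × List Int) i =>
        if i ∈ s.2.1 then (s.1, s.2.1, s.2.2 ++ [s.1])
        else (s.1 + 1, s.2.1 ++ [i], s.2.2 ++ [s.1 + 1]))
      (x, arr, k2)).2.2) = k2 ++ pvARec l x arr := by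
  induction l generalizing x arr k2 with
  | nil => simp [pvARec]
  | cons i l ih =>
    simp only [List.foldl_cons, pvARec]
    by_cases h : i ∈ arr <;> simp [h, ih]

theorem pvOfList_append_singleton (p : List Int) (v : Int) :
    PySem.Set.ofList (p ++ [v]) = PySem.Set.add (PySem.Set.ofList p) v := by
  simp [PySem.Set.ofList_eq_foldl]

-- main invariant: klass = p ++ l, A's arr is set(p), A's x is len(set(p)) - 1
theorem pvMain (klass p l : List Int) (hk : klass = p ++ l) :
    pvARec l (((PySem.Set.ofList p).length : Int) - 1) (PySem.Set.ofList p)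
      = (PySem.List.pyRange (p.length : Int) ((p.length : Int) + (l.length : Int)) 1).map
          (fun j => ((PySem.Set.ofList (PySem.List.slice klass none (some (j + 1)))).length : Int) - 1) := by
  induction l generalizing p with
  | nil => simp [pvARec, PySem.List.pyRange_one_eq_nil]
  | cons v l ih =>
    have hcons : PySem.List.pyRange (p.length : Int) ((p.length : Int) + ((v :: l).length : Int)) 1
        = (p.length : Int) :: PySem.List.pyRange ((p.length : Int) + 1) ((p.length : Int) + ((v :: l).length : Int)) 1 := by
      apply PySem.List.pyRange_one_cons
      simp only [List.length_cons]
      push_cast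
      omega
    have htake : PySem.List.slice klass none (some ((p.length : Int) + 1)) = p ++ [v] := by
      have : ((p.length : Int) + 1) = ((p.length + 1 : Nat) : Int) := by push_cast; ring
      rw [this, PySem.List.slice_to_natCast, hk]
      rw [List.take_append]
      simp
    have hset := pvOfList_append_singleton p v
    have hrange : PySem.List.pyRange ((p.length : Int) + 1) ((p.length : Int) + ((v :: l).length : Int)) 1
        = PySem.List.pyRange (((p ++ [v]).length : Nat) : Int) ((((p ++ [v]).length : Nat) : Int) + (l.length : Int)) 1 := by
      congr 1 <;> (simp only [List.length_append, List.length_cons, List.length_nil]; push_cast; ring)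
    have hk' : klass = (p ++ [v]) ++ l := by simp [hk]
    simp only [pvARec, hcons, List.map_cons, htake, hset]
    by_cases h : v ∈ PySem.Set.ofList p
    · have hadd : PySem.Set.add (PySem.Set.ofList p) v = PySem.Set.ofList p := by
        simp [PySem.Set.add, PySem.Set.contains, h]
      rw [if_pos h, hadd, hrange]
      have := ih (p ++ [v]) hk'
      rw [hset, hadd] at this
      rw [← this]
    · have hadd : PySem.Set.add (PySem.Set.ofList p) v = PySem.Set.ofList p ++ [v] := by
        simp [PySem.Set.add, PySem.Set.contains, h]
      rw [if_neg h, hadd, hrange]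
      have := ih (p ++ [v]) hk'
      rw [hset, hadd] at this
      rw [← this]
      simp only [List.length_append, List.length_cons, List.length_nil]
      have he : (((PySem.Set.ofList p).length + (0 + 1) : Nat) : Int) - 1
          = ((PySem.Set.ofList p).length : Int) - 1 + 1 := by push_cast; ring
      rw [he]

-- ===== VERDICT (by name: the statement is the Claim_ definition above) =====
theorem seq_klass_spec : Claim_equal_seq_klass := by
  intro klass _
  unfold Spec_seq_klass seq_klass seq_klass_alt
  rw [pvFoldA]
  have := pvMain klass [] klass (by simp)
  simpa using this
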